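-- pv_equiv track=rewrite | github.com/jhcnode/classifier_by_pytorch | lib/datasets/dataset_factory.py | count_category
-- ===== SOURCE A (Python) =====
-- def count_category(origin_labels):
-- 	class_to_count={}
--
-- 	for i in range(len(origin_labels)):
-- 		label=origin_labels[i]['label']
-- 		if not label in class_to_count.keys():
-- 			class_to_count[label]=0
-- 			class_to_count[label]+=1
-- 		else:
-- 			class_to_count[label]+=1
--
-- 	def sort_key(x):
-- 		return x[0]
-- 	class_to_count=dict(sorted(class_to_count.items(),key=sort_key,reverse=True))
-- 	return class_to_count
-- ===== SOURCE B (Python) =====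
-- def count_category(origin_labels):
-- 	# sort-then-group: sort all labels descending, then count runs of equal
-- 	# labels in one linear scan, inserting in already-descending order.
-- 	labels = sorted((e['label'] for e in origin_labels), reverse=True)
-- 	out = {}
-- 	i = 0
-- 	n = len(labels)
-- 	while i < n:
-- 		j = i + 1
-- 		while j < n and labels[j] == labels[i]:
-- 			j += 1
-- 		out[labels[i]] = j - i
-- 		i = j
-- 	return out
-- ===== Notes on version B (the rewrite author's own statement) =====
-- stated objective: alternative
-- what changed: A counts labels in a dict and then sorts the dict items by key descending; B sorts all labels descending first and counts runs of equal labels in one linear scan, so no counting dict and no item sort are needed.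
import Mathlib
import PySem

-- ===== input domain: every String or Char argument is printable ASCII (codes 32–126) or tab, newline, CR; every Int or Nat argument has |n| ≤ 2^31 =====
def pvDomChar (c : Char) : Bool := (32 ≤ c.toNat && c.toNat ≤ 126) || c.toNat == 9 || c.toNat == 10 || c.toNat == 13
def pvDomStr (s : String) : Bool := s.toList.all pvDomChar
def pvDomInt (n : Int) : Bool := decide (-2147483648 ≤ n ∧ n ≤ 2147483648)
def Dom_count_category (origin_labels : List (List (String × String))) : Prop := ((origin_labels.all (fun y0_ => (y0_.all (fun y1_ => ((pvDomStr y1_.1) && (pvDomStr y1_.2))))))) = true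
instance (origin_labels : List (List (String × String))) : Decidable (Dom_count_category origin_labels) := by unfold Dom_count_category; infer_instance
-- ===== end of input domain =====

-- A counts labels in a dict then sorts the items by key descending; B sorts the labels
-- descending first and counts runs of equal labels — same result, different algorithm.

-- ===== PORT A =====
-- A's `for i in range(len(origin_labels))` loop; `origin_labels[i]['label']` is a dict
-- lookup that raises KeyError when absent — Pre_ excludes that; `.getD ""` is the total form.
def count_category (origin_labels : List (List (String × String))) : List (String × Int) :=
  PySem.List.sorted
    ((PySem.List.pyRange 0 (PySem.List.len origin_labels)).foldl
      (fun d i =>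
        let label := ((PySem.Dict.mk (PySem.List.pyGetD origin_labels i [])).get? "label").getD ""
        if ¬ (d.contains label) then
          ((d.insert label 0).modify label 0 (· + 1))
        else
          d.modify label 0 (· + 1)) PySem.Dict.empty).items
    (fun x => x.1) true

-- ===== PORT B =====
-- B's inner while loop: one run of equal labels at the front
def pvRuns : List String → List (String × Int)
  | [] => []
  | x :: rest =>
      (x, 1 + ((rest.takeWhile (· == x)).length : Int)) :: pvRuns (rest.dropWhile (· == x))
  termination_by l => l.length
  decreasing_by
    exact Nat.lt_succ_of_le (List.length_dropWhile_le _ _)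

def count_category_alt (origin_labels : List (List (String × String))) : List (String × Int) :=
  pvRuns (PySem.List.sorted
    (origin_labels.map (fun e => ((PySem.Dict.mk e).get? "label").getD ""))
    (fun x => x) true)

-- ===== PRECONDITION & SPEC =====
-- Pre_ excludes exactly the inputs where some element has no "label" key: there A raises KeyError.
def Pre_count_category (origin_labels : List (List (String × String))) : Prop :=
  (origin_labels.all (fun e => (PySem.Dict.mk e).contains "label")) = true
instance (origin_labels : List (List (String × String))) : Decidable (Pre_count_category origin_labels) := by unfold Pre_count_category; infer_instance
def pvWitness_count_category : (List (List (String × String))) :=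
  [[("label", "cat")], [("label", "dog")], [("label", "cat")]]
def Spec_count_category (origin_labels : List (List (String × String))) (out : List (String × Int)) : Prop := out = count_category_alt origin_labels
instance (origin_labels : List (List (String × String))) (out : List (String × Int)) : Decidable (Spec_count_category origin_labels out) := by unfold Spec_count_category; infer_instance

-- ===== CLAIM (what is proved, stated in full; the proofs are below) =====
def Claim_equal_count_category : Prop := ∀ (origin_labels : List (List (String × String))), Dom_count_category origin_labels → Pre_count_category origin_labels → Spec_count_category origin_labels (count_category origin_labels)

-- ===== LEMMAS AND PROOFS =====

-- A's if/else counting step is the Counter step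
theorem pv_step_eq (d : PySem.Dict String Int) (x : String) :
    (if ¬ (d.contains x) then ((d.insert x 0).modify x 0 (· + 1))
     else d.modify x 0 (· + 1)) = d.modify x 0 (· + 1) := by
  by_cases h : d.contains x = true
  · simp [h]
  · rw [if_pos h]
    replace h : d.contains x = false := by simpa using h
    obtain ⟨l⟩ := d
    simp only [PySem.Dict.contains, List.any_eq_false] at h
    have hf : List.find? (fun p : String × Int => p.1 == x) l = none :=
      List.find?_eq_none.mpr (fun p hp => by simpa using h p hp)
    simp [PySem.Dict.modify, PySem.Dict.insert, PySem.Dict.contains, PySem.Dict.getD,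
      PySem.Dict.get?, hf, List.find?_append, List.any_eq_false.mpr h, List.map_append]
    calc List.map (fun p => if p.1 = x then (x, 1) else p) l
        = List.map id l := List.map_congr_left (fun p hp => by
          have := h p hp; simp at this; simp [this])
      _ = l := List.map_id l

-- dropWhile / takeWhile give sublists, so membership transfers
theorem pv_mem_drop {y : String} {p : String → Bool} {xs : List String}
    (h : y ∈ xs.dropWhile p) : y ∈ xs :=
  List.Sublist.mem h (List.dropWhile_sublist p)

-- in a weakly descending list the head bounds every element
theorem pv_head_ge {x : String} {xs : List String}
    (h : (x :: xs).Pairwise (fun a b => b ≤ a)) : ∀ y ∈ xs, y ≤ x :=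
  (List.pairwise_cons.mp h).1

-- after dropping the run of the head, everything is strictly below the head
theorem pv_drop_lt {x : String} {xs : List String}
    (h : (x :: xs).Pairwise (fun a b => b ≤ a)) :
    ∀ y ∈ xs.dropWhile (· == x), y < x := by
  intro y hy
  have hyle : y ≤ x := pv_head_ge h y (pv_mem_drop hy)
  rcases eq_or_lt_of_le hyle with heq | hlt
  · exfalso
    cases hd : xs.dropWhile (· == x) with
    | nil => simp [hd] at hy
    | cons c t =>
        have hc0 := List.head?_dropWhile_not (fun z : String => z == x) xs
        rw [hd] at hc0
        have hcx : c ≠ x := by simpa using hc0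
        have hdw : (c :: t).Pairwise (fun a b : String => b ≤ a) := by
          have := (List.pairwise_cons.mp h).2
          exact hd ▸ this.sublist (List.dropWhile_sublist _)
        have hcle : c ≤ x := pv_head_ge h c (pv_mem_drop (p := (· == x))
          (by rw [hd]; exact List.mem_cons_self))
        rcases List.mem_cons.mp (hd ▸ hy : y ∈ c :: t) with h1 | h2
        · exact hcx (by rw [← h1]; exact heq)
        · exact hcx (le_antisymm hcle (by
            rw [← heq]
            exact pv_head_ge hdw y h2))
  · exact hlt

-- membership in pvRuns of a weakly descending list: key ∈ list, value = its count
theorem pv_mem_runs (S : List String) (h : S.Pairwise (fun a b => b ≤ a)) (p : String × Int) :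
    p ∈ pvRuns S ↔ p.1 ∈ S ∧ p.2 = (S.count p.1 : Int) := by
  induction S using pvRuns.induct with
  | case1 => simp [pvRuns]
  | case2 x rest ih =>
      have htw : ∀ y ∈ rest.takeWhile (· == x), y = x := by
        intro y hy
        simpa using List.mem_takeWhile_imp hy
      have hdl : ∀ y ∈ rest.dropWhile (· == x), y < x := pv_drop_lt h
      have hrest : (rest.dropWhile (· == x)).Pairwise (fun a b : String => b ≤ a) :=
        ((List.pairwise_cons.mp h).2).sublist (List.dropWhile_sublist _)
      have hsplit : rest.takeWhile (· == x) ++ rest.dropWhile (· == x) = rest :=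
        List.takeWhile_append_dropWhile
      have hxnd : x ∉ rest.dropWhile (· == x) := fun hx => lt_irrefl x (hdl x hx)
      have hcx : (x :: rest).count x = 1 + (rest.takeWhile (· == x)).length := by
        rw [List.count_cons_self]
        conv_lhs => rw [← hsplit]
        rw [List.count_append, List.count_eq_zero.mpr hxnd, List.count_eq_length.mpr (by
          intro y hy; simpa using (htw y hy).symm)]
        omega
      have hcne : ∀ q : String, q ≠ x →
          (x :: rest).count q = (rest.dropWhile (· == x)).count q := by
        intro q hq
        rw [List.count_cons_of_ne (Ne.symm hq)]
        conv_lhs => rw [← hsplit]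
        rw [List.count_append, List.count_eq_zero.mpr (fun hc => hq (htw _ hc))]
        omega
      rw [pvRuns]
      constructor
      · intro hp
        rcases List.mem_cons.mp hp with hp | hp
        · subst hp
          refine ⟨List.mem_cons_self, ?_⟩
          simp only [hcx]; push_cast; ring
        · obtain ⟨hmem, hcnt⟩ := (ih hrest).mp hp
          refine ⟨List.mem_cons_of_mem _ (pv_mem_drop hmem), ?_⟩
          rw [hcnt, hcne p.1 (ne_of_lt (hdl _ hmem))]
      · rintro ⟨hmem, hcnt⟩
        by_cases hpx : p.1 = x
        · have hpeq : p = (x, 1 + ((rest.takeWhile (· == x)).length : Int)) := by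
            have h2 : p.2 = 1 + ((rest.takeWhile (· == x)).length : Int) := by
              rw [hcnt, hpx, hcx]; push_cast; ring
            calc p = (p.1, p.2) := rfl
              _ = (x, 1 + ((rest.takeWhile (· == x)).length : Int)) := by rw [hpx, h2]
          rw [hpeq]
          exact List.mem_cons_self
        · have hmem' : p.1 ∈ rest := by
            rcases List.mem_cons.mp hmem with h1 | h1
            · exact absurd h1 hpx
            · exact h1
          have hmemd : p.1 ∈ rest.dropWhile (· == x) := by
            rw [← hsplit] at hmem'
            rcases List.mem_append.mp hmem' with h1 | h1
            · exact absurd (htw _ h1) hpx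
            · exact h1
          refine List.mem_cons_of_mem _ ((ih hrest).mpr ⟨hmemd, ?_⟩)
          rw [hcnt, hcne p.1 hpx]

-- the keys produced by pvRuns are members of the list
theorem pv_runs_fst_mem (S : List String) (p : String × Int) (hp : p ∈ pvRuns S) : p.1 ∈ S := by
  induction S using pvRuns.induct with
  | case1 => simp [pvRuns] at hp
  | case2 x rest ih =>
      rw [pvRuns] at hp
      rcases List.mem_cons.mp hp with hp | hp
      · subst hp; simp
      · exact List.mem_cons_of_mem _ (pv_mem_drop (ih hp))

-- pvRuns of a weakly descending list has strictly descending keys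
theorem pv_runs_pairwise (S : List String) (h : S.Pairwise (fun a b => b ≤ a)) :
    (pvRuns S).Pairwise (fun a b : String × Int => b.1 < a.1) := by
  induction S using pvRuns.induct with
  | case1 => simp [pvRuns]
  | case2 x rest ih =>
      have hrest : (rest.dropWhile (· == x)).Pairwise (fun a b : String => b ≤ a) :=
        ((List.pairwise_cons.mp h).2).sublist (List.dropWhile_sublist _)
      rw [pvRuns]
      refine List.pairwise_cons.mpr ⟨?_, ih hrest⟩
      intro p hp
      exact pv_drop_lt h _ (pv_runs_fst_mem _ _ hp)

-- ===== VERDICT (by name: the statement is the Claim_ definition above) =====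
theorem count_category_spec : Claim_equal_count_category := by
  intro origin_labels _ hpre
  unfold Spec_count_category count_category count_category_alt
  set f : List (String × String) → String :=
    fun e => ((PySem.Dict.mk e).get? "label").getD "" with hf
  set L : List String := origin_labels.map f with hL
  set S : List String := PySem.List.sorted L (fun x => x) true with hS
  -- A's loop is Counter(L)
  have hfun : (fun (d : PySem.Dict String Int) (i : Int) =>
        let label := ((PySem.Dict.mk (PySem.List.pyGetD origin_labels i [])).get? "label").getD ""
        if ¬ (d.contains label) then
          ((d.insert label 0).modify label 0 (· + 1))
        else
          d.modify label 0 (· + 1))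
      = (fun (d : PySem.Dict String Int) (i : Int) =>
          d.modify (f (PySem.List.pyGetD origin_labels i [])) 0 (· + 1)) := by
    funext d i
    exact pv_step_eq d _
  have hloop :
      (PySem.List.pyRange 0 (PySem.List.len origin_labels)).foldl
        (fun d i =>
          let label := ((PySem.Dict.mk (PySem.List.pyGetD origin_labels i [])).get? "label").getD ""
          if ¬ (d.contains label) then
            ((d.insert label 0).modify label 0 (· + 1))
          else
            d.modify label 0 (· + 1)) PySem.Dict.empty
      = PySem.Dict.counter L := by
    rw [hfun]
    have h1 := PySem.List.foldl_pyRange_pyGetD origin_labels []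
      (fun (d : PySem.Dict String Int) (e : List (String × String)) => d.modify (f e) 0 (· + 1))
      PySem.Dict.empty (le_refl 0)
    have h2 : List.foldl
        (fun (d : PySem.Dict String Int) (e : List (String × String)) => d.modify (f e) 0 (· + 1))
        PySem.Dict.empty origin_labels = PySem.Dict.counter L := by
      rw [PySem.Dict.counter_eq_foldl, hL, List.foldl_map]
    exact h1.trans h2
  rw [hloop, PySem.Dict.items_counter]
  -- now compare the sorted items with pvRuns S
  have hSdesc : S.Pairwise (fun a b : String => b ≤ a) := PySem.List.sorted_pairwise_rev L _
  have hSperm : S.Perm L := PySem.List.sorted_perm L _ _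
  apply PySem.List.sorted_rev_eq_of_perm_of_pairwise_gt
  · -- Perm via nodup + same membership
    have hnd1 : (pvRuns S).Nodup :=
      (pv_runs_pairwise S hSdesc).imp
        (fun hab heq => absurd (heq ▸ hab) (lt_irrefl _))
    have hnd2 : ((PySem.Set.ofList L).map (fun k => (k, ((L.count k : Nat) : Int)))).Nodup :=
      (PySem.Set.nodup_ofList L).map (fun a b hab => congrArg Prod.fst hab)
    apply (List.perm_ext_iff_of_nodup hnd1 hnd2).mpr
    intro p
    rw [pv_mem_runs S hSdesc p]
    constructor
    · rintro ⟨hmem, hcnt⟩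
      apply List.mem_map.mpr
      refine ⟨p.1, (PySem.Set.mem_ofList L p.1).mpr (hSperm.mem_iff.mp hmem), ?_⟩
      have : p.2 = (L.count p.1 : Int) := by rw [hcnt, hSperm.count_eq]
      calc (p.1, ((L.count p.1 : Nat) : Int)) = (p.1, p.2) := by rw [this]
        _ = p := rfl
    · intro hp
      obtain ⟨k, hk, hkp⟩ := List.mem_map.mp hp
      have h1 : p.1 = k := by rw [← hkp]
      have h2 : p.2 = (L.count k : Int) := by rw [← hkp]
      refine ⟨?_, ?_⟩
      · rw [h1]; exact hSperm.mem_iff.mpr ((PySem.Set.mem_ofList L k).mp hk)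
      · rw [h2, h1, hSperm.count_eq]
  · exact pv_runs_pairwise S hSdesc
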